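-- pv_equiv track=rewrite | github.com/Comecacahuates/simulacion-protocolo-erutamiento | scripts/geohash2shp.py | children_geohashes
-- ===== SOURCE A (Python) =====
-- base32 = '0123456789bcdefghjkmnpqrstuvwxyz'
--
-- def children_geohashes(parent_geohash, children_geohash_length):
--     """!
--     Genera todos los códigos Geohash hijos de una longitud específica
--     a partir de un código Geohash padre.
--
--     @param parent_geohash: Código Geohash padre. Es el prefijo de
--     los códigos Geohash hijos que se van a generar.
--     @param children_geohash_length: Longitud total de los códigos Geohash hijos.
--     @return: Lista de códigos Geohash.
--     """
--
--     """
--     Se verifica que la longitd de los códigos hijos sea mayor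
--     a la del código padre.
--     """
--     if children_geohash_length <= len(parent_geohash):
--         raise ValueError("La longitud de los códigos Geohash hijos debe ser \
--         mayor a la del código Geohash padre.")
--
--     geohashes = [parent_geohash]
--     for i in range(children_geohash_length - len(parent_geohash)):
--         n_geohashes = len(geohashes)
--         geohashes *= len(base32)
--         for j in range(len(base32)):
--             for k in range(n_geohashes):
--                 geohashes[j * n_geohashes + k] += base32[j]
--     return geohashes
-- ===== SOURCE B (Python) =====
-- import itertools
--
-- base32 = '0123456789bcdefghjkmnpqrstuvwxyz'
--
-- def children_geohashes(parent_geohash, children_geohash_length):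
--     if children_geohash_length <= len(parent_geohash):
--         raise ValueError("La longitud de los códigos Geohash hijos debe ser \
--         mayor a la del código Geohash padre.")
--     d = children_geohash_length - len(parent_geohash)
--     return [parent_geohash + ''.join(reversed(combo))
--             for combo in itertools.product(base32, repeat=d)]
-- ===== Notes on version B (the rewrite author's own statement) =====
-- stated objective: idiomatic
-- what changed: Replaces A's in-place list-doubling loop (replicate the list 32x, then patch every slot by index) with a direct itertools.product enumeration of the suffix alphabet, joining each combination reversed to reproduce A's exact order.
import Mathlib
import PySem

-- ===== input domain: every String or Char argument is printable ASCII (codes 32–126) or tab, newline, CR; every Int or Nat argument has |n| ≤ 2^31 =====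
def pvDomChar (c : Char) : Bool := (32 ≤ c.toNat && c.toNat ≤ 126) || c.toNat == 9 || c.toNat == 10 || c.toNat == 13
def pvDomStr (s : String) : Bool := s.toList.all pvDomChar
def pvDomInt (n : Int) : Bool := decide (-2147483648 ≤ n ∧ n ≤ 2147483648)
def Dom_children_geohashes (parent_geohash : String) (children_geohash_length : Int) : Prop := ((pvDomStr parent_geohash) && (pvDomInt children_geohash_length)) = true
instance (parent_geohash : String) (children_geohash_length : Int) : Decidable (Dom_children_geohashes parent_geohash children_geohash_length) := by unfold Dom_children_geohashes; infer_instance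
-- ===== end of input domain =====

-- B replaces A's in-place list-doubling loop by a direct enumeration of the Cartesian
-- product of base32 characters (itertools.product) with a reversed join (objective: idiomatic).
-- Geohash strings are carried as List Char inside both ports (String.ofList at the end),
-- since Lean's own String operations are opaque to the kernel; this is exact on the domain.

-- ===== PORT A =====
def base32chars : List Char := "0123456789bcdefghjkmnpqrstuvwxyz".toList

def children_geohashes (parent_geohash : String) (children_geohash_length : Int) : List String :=
  if children_geohash_length ≤ PySem.Str.len parent_geohash then []  -- Python raises ValueError here (excluded by Pre_)
  else
    ((PySem.List.pyRange 0 (children_geohash_length - PySem.Str.len parent_geohash) 1).foldl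
      (fun geohashes _ =>
        let n := geohashes.length
        let gs := (List.replicate base32chars.length geohashes).flatten  -- geohashes *= len(base32)
        (List.range base32chars.length).foldl
          (fun acc j =>
            (List.range n).foldl
              (fun acc2 k =>
                acc2.set (j * n + k) (acc2.getD (j * n + k) [] ++ [base32chars.getD j ' ']))
              acc)
          gs)
      [parent_geohash.toList]).map String.ofList

-- ===== PORT B =====
-- itertools.product(base32, repeat=d): first factor varies slowest, last fastest
def pyProduct (cs : List Char) : Nat → List (List Char)
  | 0 => [[]]
  | d + 1 => cs.flatMap (fun c => (pyProduct cs d).map (c :: ·))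

def children_geohashes_alt (parent_geohash : String) (children_geohash_length : Int) : List String :=
  if children_geohash_length ≤ PySem.Str.len parent_geohash then []  -- same ValueError guard (excluded by Pre_)
  else
    (pyProduct base32chars (children_geohash_length - PySem.Str.len parent_geohash).toNat).map
      (fun combo => String.ofList (parent_geohash.toList ++ combo.reverse))

-- ===== PRECONDITION & SPEC =====
-- Pre_ excludes exactly the inputs where A raises ValueError (children length not greater than parent length).
def Pre_children_geohashes (parent_geohash : String) (children_geohash_length : Int) : Prop :=
  PySem.Str.len parent_geohash < children_geohash_length
instance (parent_geohash : String) (children_geohash_length : Int) : Decidable (Pre_children_geohashes parent_geohash children_geohash_length) := by unfold Pre_children_geohashes; infer_instance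

def pvWitness_children_geohashes : String × Int := ("x", 2)

def Spec_children_geohashes (parent_geohash : String) (children_geohash_length : Int) (out : List String) : Prop := out = children_geohashes_alt parent_geohash children_geohash_length
instance (parent_geohash : String) (children_geohash_length : Int) (out : List String) : Decidable (Spec_children_geohashes parent_geohash children_geohash_length out) := by unfold Spec_children_geohashes; infer_instance

-- ===== CLAIM (what is proved, stated in full; the proofs are below) =====
def Claim_equal_children_geohashes : Prop := ∀ (parent_geohash : String) (children_geohash_length : Int), Dom_children_geohashes parent_geohash children_geohash_length → Pre_children_geohashes parent_geohash children_geohash_length → Spec_children_geohashes parent_geohash children_geohash_length (children_geohashes parent_geohash children_geohash_length)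

-- ===== LEMMAS AND PROOFS =====

-- one pass of A's innermost loop rewrites one block of length g.length in place
lemma inner_fold (c : Char) : ∀ (g pre rest : List (List Char)),
    (List.range g.length).foldl
      (fun acc2 k => acc2.set (pre.length + k) (acc2.getD (pre.length + k) [] ++ [c]))
      (pre ++ (g ++ rest))
    = pre ++ (g.map (· ++ [c]) ++ rest)
  | [], pre, rest => by simp
  | x :: g, pre, rest => by
    rw [List.length_cons, List.range_succ_eq_map, List.foldl_cons, List.foldl_map,
      List.cons_append]
    have hget : (pre ++ (x :: (g ++ rest))).getD (pre.length + 0) [] = x := by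
      simp
    have hset : (pre ++ (x :: (g ++ rest))).set (pre.length + 0) (x ++ [c])
        = (pre ++ [x ++ [c]]) ++ (g ++ rest) := by
      rw [Nat.add_zero, List.set_append_right] <;> simp
    rw [hget, hset]
    have ih := inner_fold c g (pre ++ [x ++ [c]]) rest
    have harg : ∀ (acc2 : List (List Char)) (k : Nat),
        acc2.set (pre.length + Nat.succ k) (acc2.getD (pre.length + Nat.succ k) [] ++ [c])
        = acc2.set ((pre ++ [x ++ [c]]).length + k) (acc2.getD ((pre ++ [x ++ [c]]).length + k) [] ++ [c]) := by
      intro acc2 k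
      have : pre.length + Nat.succ k = (pre ++ [x ++ [c]]).length + k := by simp; omega
      rw [this]
    calc (List.range g.length).foldl
          (fun acc2 k => acc2.set (pre.length + Nat.succ k) (acc2.getD (pre.length + Nat.succ k) [] ++ [c]))
          ((pre ++ [x ++ [c]]) ++ (g ++ rest))
        = (List.range g.length).foldl
          (fun acc2 k => acc2.set ((pre ++ [x ++ [c]]).length + k) (acc2.getD ((pre ++ [x ++ [c]]).length + k) [] ++ [c]))
          ((pre ++ [x ++ [c]]) ++ (g ++ rest)) := by
          exact List.foldl_ext _ _ _ (fun acc2 k _ => harg acc2 k)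
      _ = (pre ++ [x ++ [c]]) ++ (g.map (· ++ [c]) ++ rest) := ih
      _ = pre ++ ((x :: g).map (· ++ [c]) ++ rest) := by simp

-- A's middle loop over the 32 blocks, with an offset j0 of already-finished blocks
lemma outer_fold (cs : List Char) (g : List (List Char)) : ∀ (m j0 : Nat) (pre : List (List Char)),
    pre.length = j0 * g.length →
    ((List.range m).map (· + j0)).foldl
      (fun acc j => (List.range g.length).foldl
          (fun acc2 k => acc2.set (j * g.length + k) (acc2.getD (j * g.length + k) [] ++ [cs.getD j ' ']))
          acc)
      (pre ++ (List.replicate m g).flatten)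
    = pre ++ ((List.range m).map (· + j0)).flatMap (fun j => g.map (· ++ [cs.getD j ' ']))
  | 0, j0, pre, _ => by simp
  | m + 1, j0, pre, hpre => by
    rw [List.range_succ_eq_map, List.map_cons, List.foldl_cons, List.replicate_succ,
      List.flatten_cons]
    have h0 : (0 : Nat) + j0 = j0 := by omega
    rw [h0]
    have hfix : ∀ (acc2 : List (List Char)) (k : Nat),
        acc2.set (j0 * g.length + k) (acc2.getD (j0 * g.length + k) [] ++ [cs.getD j0 ' '])
        = acc2.set (pre.length + k) (acc2.getD (pre.length + k) [] ++ [cs.getD j0 ' ']) := by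
      intro acc2 k; rw [hpre]
    have hstep : (List.range g.length).foldl
        (fun acc2 k => acc2.set (j0 * g.length + k) (acc2.getD (j0 * g.length + k) [] ++ [cs.getD j0 ' ']))
        (pre ++ (g ++ (List.replicate m g).flatten))
        = pre ++ (g.map (· ++ [cs.getD j0 ' ']) ++ (List.replicate m g).flatten) := by
      rw [List.foldl_ext _ _ _ (fun acc2 k _ => hfix acc2 k)]
      exact inner_fold (cs.getD j0 ' ') g pre (List.replicate m g).flatten
    rw [hstep]
    have hmap : (List.map Nat.succ (List.range m)).map (· + j0) = (List.range m).map (· + (j0 + 1)) := by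
      rw [List.map_map]; apply List.map_congr_left; intro a _; simp [Nat.succ_eq_add_one]; omega
    rw [hmap, ← List.append_assoc]
    have hlen : (pre ++ g.map (· ++ [cs.getD j0 ' '])).length = (j0 + 1) * g.length := by
      simp [hpre]; ring
    rw [outer_fold cs g m (j0 + 1) (pre ++ g.map (· ++ [cs.getD j0 ' '])) hlen]
    simp

-- flatMap over indices = flatMap over the character list itself
lemma flatMap_range_getD (f : Char → List (List Char)) : ∀ (cs : List Char),
    (List.range cs.length).flatMap (fun j => f (cs.getD j ' '))
    = cs.flatMap f
  | [] => by simp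
  | c :: cs => by
    rw [List.length_cons, List.range_succ_eq_map, List.flatMap_cons, List.flatMap_map]
    have h : ∀ a ∈ List.range cs.length,
        f ((c :: cs).getD (Nat.succ a) ' ') = f (cs.getD a ' ') := by
      intro a _; simp
    rw [List.flatMap_congr h, flatMap_range_getD f cs]
    simp

-- one pass of A's body is exactly "append each base32 char to every geohash, block by block"
lemma stepA_eq (cs : List Char) (g : List (List Char)) :
    (List.range cs.length).foldl
      (fun acc j =>
        (List.range g.length).foldl
          (fun acc2 k => acc2.set (j * g.length + k) (acc2.getD (j * g.length + k) [] ++ [cs.getD j ' ']))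
          acc)
      ((List.replicate cs.length g).flatten)
    = cs.flatMap (fun c => g.map (· ++ [c])) := by
  have h := outer_fold cs g cs.length 0 [] (by simp)
  simp only [List.nil_append] at h
  have hmap : (List.range cs.length).map (· + 0) = List.range cs.length := by simp
  rw [hmap] at h
  rw [h, flatMap_range_getD (fun c => g.map (· ++ [c])) cs]

-- d iterations of A's body, started from the singleton parent, enumerate the product
lemma iterate_eq (p : List Char) : ∀ (l : List Int),
    l.foldl
      (fun geohashes _ =>
        let n := geohashes.length
        let gs := (List.replicate base32chars.length geohashes).flatten
        (List.range base32chars.length).foldl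
          (fun acc j =>
            (List.range n).foldl
              (fun acc2 k =>
                acc2.set (j * n + k) (acc2.getD (j * n + k) [] ++ [base32chars.getD j ' ']))
              acc)
          gs)
      [p]
    = (pyProduct base32chars l.length).map (fun combo => p ++ combo.reverse) := by
  -- generalize: from any state of the mapped form, one step stays in the mapped form
  suffices hstep : ∀ (d : Nat) (l : List Int),
      l.foldl
        (fun geohashes _ =>
          let n := geohashes.length
          let gs := (List.replicate base32chars.length geohashes).flatten
          (List.range base32chars.length).foldl
            (fun acc j =>
              (List.range n).foldl
                (fun acc2 k =>
                  acc2.set (j * n + k) (acc2.getD (j * n + k) [] ++ [base32chars.getD j ' ']))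
                acc)
            gs)
        ((pyProduct base32chars d).map (fun combo => p ++ combo.reverse))
      = (pyProduct base32chars (d + l.length)).map (fun combo => p ++ combo.reverse) by
    intro l
    have h := hstep 0 l
    simpa [pyProduct] using h
  intro d l
  induction l generalizing d with
  | nil => simp
  | cons _ t ih =>
    rw [List.foldl_cons]
    have hone : (List.range base32chars.length).foldl
        (fun acc j =>
          (List.range ((pyProduct base32chars d).map (fun combo => p ++ combo.reverse)).length).foldl
            (fun acc2 k =>
              acc2.set (j * ((pyProduct base32chars d).map (fun combo => p ++ combo.reverse)).length + k)
                (acc2.getD (j * ((pyProduct base32chars d).map (fun combo => p ++ combo.reverse)).length + k) [] ++ [base32chars.getD j ' ']))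
            acc)
        ((List.replicate base32chars.length ((pyProduct base32chars d).map (fun combo => p ++ combo.reverse))).flatten)
        = (pyProduct base32chars (d + 1)).map (fun combo => p ++ combo.reverse) := by
      rw [stepA_eq base32chars ((pyProduct base32chars d).map (fun combo => p ++ combo.reverse))]
      show _ = (base32chars.flatMap (fun c => (pyProduct base32chars d).map (c :: ·))).map
        (fun combo => p ++ combo.reverse)
      rw [List.map_flatMap]
      apply List.flatMap_congr; intro c _
      rw [List.map_map, List.map_map]
      apply List.map_congr_left; intro m _
      simp
    simp only [] at hone ⊢
    rw [hone]
    have := ih (d + 1)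
    rw [this, List.length_cons]
    ring_nf

-- ===== VERDICT (by name: the statement is the Claim_ definition above) =====
theorem children_geohashes_spec : Claim_equal_children_geohashes := by
  intro p l _ hpre
  unfold Spec_children_geohashes children_geohashes children_geohashes_alt
  unfold Pre_children_geohashes at hpre
  rw [if_neg (by omega), if_neg (by omega)]
  rw [iterate_eq p.toList (PySem.List.pyRange 0 (l - PySem.Str.len p) 1)]
  have hlen : (PySem.List.pyRange 0 (l - PySem.Str.len p) 1).length = (l - PySem.Str.len p).toNat := by
    simp [pysem]
  rw [hlen, List.map_map]
  simp [Function.comp]
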